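-- pv_equiv track=rewrite | github.com/MrBrantCode/unitest_baseline | mut_generate/mist_train_cf/cf_21434/solution.py | find_highest_frequency_character
-- ===== SOURCE A (Python) =====
-- def find_highest_frequency_character(string: str) -> str:
--     frequency_dict = {}
--
--     for char in string:
--         if char in frequency_dict:
--             frequency_dict[char] += 1
--         else:
--             frequency_dict[char] = 1
--
--     max_frequency = 0
--     highest_frequency_character = ""
--
--     for char, frequency in frequency_dict.items():
--         if frequency > max_frequency:
--             max_frequency = frequency
--             highest_frequency_character = char
--         elif frequency == max_frequency and string.index(char) < string.index(highest_frequency_character):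
--             highest_frequency_character = char
--
--     return highest_frequency_character
-- ===== SOURCE B (Python) =====
-- def find_highest_frequency_character(string: str) -> str:
--     if not string:
--         return ""
--     counts = {}
--     for ch in string:
--         counts[ch] = counts.get(ch, 0) + 1
--     max_count = max(counts.values())
--     for ch in string:
--         if counts[ch] == max_count:
--             return ch
-- ===== Notes on version B (the rewrite author's own statement) =====
-- stated objective: simpler
-- what changed: B separates the max count from the tie-break: it computes max(counts.values()) and then scans the original string left-to-right for the first character reaching it, instead of A's running-max over dict items with repeated string.index calls.
import Mathlib
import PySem

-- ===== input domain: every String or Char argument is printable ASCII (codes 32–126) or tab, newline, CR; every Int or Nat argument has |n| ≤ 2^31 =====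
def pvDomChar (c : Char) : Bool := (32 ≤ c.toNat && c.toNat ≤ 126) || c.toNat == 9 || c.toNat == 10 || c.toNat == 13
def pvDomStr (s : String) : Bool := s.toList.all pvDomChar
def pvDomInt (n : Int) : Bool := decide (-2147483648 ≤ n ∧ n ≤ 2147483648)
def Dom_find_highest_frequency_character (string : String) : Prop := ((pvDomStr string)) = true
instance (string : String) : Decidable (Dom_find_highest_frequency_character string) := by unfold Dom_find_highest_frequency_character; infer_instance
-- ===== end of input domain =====

-- B separates "find the max count" from "find the earliest achiever" (one scan of the
-- original string), instead of A's running-max over dict items with string.index tie-breaks;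
-- objective: simpler.

-- ===== PORT A =====
-- step of A's second loop (char-by-char over frequency_dict.items());
-- string.index(ch) is PySem.Str.find: exact here since every looked-up char occurs in string
-- (and "".index → 0 = find of "").
def pvStepA (s : String) (st : Int × String) (p : Char × Int) : Int × String :=
  if p.2 > st.1 then (p.2, String.ofList [p.1])
  else if p.2 = st.1 ∧ PySem.Str.find s (String.ofList [p.1]) < PySem.Str.find s st.2 then
    (st.1, String.ofList [p.1])
  else st

def find_highest_frequency_character (string : String) : String :=
  let freq := string.toList.foldl
    (fun d c => if d.contains c then d.insert c ((d.get? c).getD 0 + 1) else d.insert c 1)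
    (PySem.Dict.empty : PySem.Dict Char Int)
  (freq.items.foldl (pvStepA string) (0, "")).2

-- ===== PORT B =====
-- max(counts.values()) is PySem.List.max?; the .getD 0 and the `none` match arm are
-- unreachable on nonempty input (the loop always returns, values is nonempty).
def find_highest_frequency_character_alt (string : String) : String :=
  if string.isEmpty then ""
  else
    let counts := string.toList.foldl
      (fun d c => d.insert c (d.getD c 0 + 1)) (PySem.Dict.empty : PySem.Dict Char Int)
    let m := (PySem.List.max? counts.values id).getD 0
    match string.toList.find? (fun c => counts.getD c 0 == m) with
    | some c => String.ofList [c]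
    | none => ""

-- ===== PRECONDITION & SPEC =====
def Spec_find_highest_frequency_character (string : String) (out : String) : Prop := out = find_highest_frequency_character_alt string
instance (string : String) (out : String) : Decidable (Spec_find_highest_frequency_character string out) := by unfold Spec_find_highest_frequency_character; infer_instance

-- ===== CLAIM (what is proved, stated in full; the proofs are below) =====
def Claim_equal_find_highest_frequency_character : Prop := ∀ (string : String), Dom_find_highest_frequency_character string → Spec_find_highest_frequency_character string (find_highest_frequency_character string)

-- ===== LEMMAS AND PROOFS =====

-- A's dict-building step is the `insert (getD + 1)` step.
theorem pv_dict_step_eq (d : PySem.Dict Char Int) (c : Char) :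
    (if d.contains c then d.insert c ((d.get? c).getD 0 + 1) else d.insert c 1)
      = d.insert c (d.getD c 0 + 1) := by
  by_cases hc : d.contains c = true
  · simp [hc, PySem.Dict.getD]
  · have hnone : d.get? c = none := by
      rw [PySem.Dict.get?]
      have hfind : d.items.find? (fun p => p.1 == c) = none := by
        rw [List.find?_eq_none]
        intro p hp hbeq
        exact hc (by rw [PySem.Dict.contains]; exact List.any_eq_true.mpr ⟨p, hp, hbeq⟩)
      rw [hfind]; rfl
    simp [hc, PySem.Dict.getD, hnone]

theorem pv_foldA_eq_counter : ∀ (xs : List Char) (d : PySem.Dict Char Int),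
    xs.foldl (fun d c => if d.contains c then d.insert c ((d.get? c).getD 0 + 1) else d.insert c 1) d
      = xs.foldl (fun d c => d.insert c (d.getD c 0 + 1)) d := by
  intro xs
  induction xs with
  | nil => intro d; rfl
  | cons c t ih => intro d; simp only [List.foldl_cons, pv_dict_step_eq]

-- first index: minimality of idxOf
theorem pv_idxOf_min : ∀ (l : List Char) (c : Char) (i : Nat), i < l.idxOf c → l[i]? ≠ some c := by
  intro l
  induction l with
  | nil => intro c i h hx; simp at hx
  | cons a t ih =>
    intro c i h
    by_cases hac : a = c
    · subst hac; simp at h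
    · rw [List.idxOf_cons] at h
      have hbeq : (a == c) = false := by simp [hac]
      rw [hbeq] at h
      simp only [cond_false] at h
      cases i with
      | zero => simpa using hac
      | succ j =>
        simp only [List.getElem?_cons_succ]
        exact ih c j (by omega)

-- Python's string.index on a present single character is idxOf.
theorem pv_find_singleton (l : List Char) (c : Char) (h : c ∈ l) :
    PySem.Chars.find l [c] = (l.idxOf c : Int) := by
  set idx := l.idxOf c with hidx
  have hlt : idx < l.length := List.idxOf_lt_length_of_mem h
  have hget : l[idx] = c := List.getElem_idxOf hlt
  have hdrop : l.drop idx = c :: l.drop (idx + 1) := by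
    rw [List.drop_eq_getElem_cons hlt, hget]
  have hpre : [c] <+: l.drop idx := by rw [hdrop]; exact ⟨l.drop (idx + 1), rfl⟩
  have hinf : [c] <:+: l := by
    refine ⟨l.take idx, l.drop (idx + 1), ?_⟩
    have := List.take_append_drop idx l
    rw [hdrop] at this; simpa using this
  have hnn : 0 ≤ PySem.Chars.find l [c] := (PySem.Chars.find_nonneg_iff l [c]).mpr hinf
  obtain ⟨hp, hmin⟩ := PySem.Chars.find_spec hnn
  set F := (PySem.Chars.find l [c]).toNat with hF
  -- F ≤ idx : otherwise minimality of find contradicts the prefix at idx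
  have h1 : F ≤ idx := by
    by_contra hlt'
    exact hmin idx (by omega) hpre
  -- idx ≤ F : the prefix at F gives l[F]? = some c, contradicting idxOf minimality
  have hgetF : l[F]? = some c := by
    obtain ⟨t, ht⟩ := hp
    have : (l.drop F)[0]? = some c := by rw [← ht]; rfl
    simpa [List.getElem?_drop] using this
  have h2 : idx ≤ F := by
    by_contra hlt'
    exact pv_idxOf_min l c F (by omega) hgetF
  have : F = idx := by omega
  omega

-- the first element found by find? has minimal idxOf among all satisfying elements
theorem pv_find?_first : ∀ (l : List Char) (p : Char → Bool) (c : Char),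
    l.find? p = some c → ∀ b ∈ l, p b = true → l.idxOf c ≤ l.idxOf b := by
  intro l
  induction l with
  | nil => intro p c h; simp at h
  | cons a t ih =>
    intro p c h b hb hpb
    by_cases hpa : p a = true
    · have hac : a = c := by simpa [List.find?_cons, hpa] using h
      subst hac
      simp [List.idxOf_cons]
    · have hfind : t.find? p = some c := by simpa [List.find?_cons, hpa] using h
      have hba : b ≠ a := fun he => hpa (he ▸ hpb)
      have hbt : b ∈ t := by
        rcases List.mem_cons.mp hb with h1 | h1
        · exact absurd (h1 ▸ hpb) hpa
        · exact h1
      have hca : c ≠ a := by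
        intro he
        exact hpa (he ▸ List.find?_some hfind)
      have hbeqc : (a == c) = false := by simp [Ne.symm hca]
      have hbeqb : (a == b) = false := by simp [Ne.symm hba]
      rw [List.idxOf_cons, List.idxOf_cons, hbeqc, hbeqb]
      simp only [cond_false]
      exact Nat.succ_le_succ (ih p c hfind b hbt hpb)

-- distinct positions: two members with equal idxOf are equal
theorem pv_idxOf_inj (l : List Char) (a b : Char) (ha : a ∈ l) (hb : b ∈ l)
    (h : l.idxOf a = l.idxOf b) : a = b := by
  have hla := List.idxOf_lt_length_of_mem ha
  have hlb := List.idxOf_lt_length_of_mem hb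
  have h1 : l[l.idxOf a]? = some a := by
    rw [List.getElem?_eq_getElem hla, List.getElem_idxOf hla]
  have h2 : l[l.idxOf b]? = some b := by
    rw [List.getElem?_eq_getElem hlb, List.getElem_idxOf hlb]
  rw [h] at h1
  rw [h1] at h2
  exact Option.some.inj h2

-- main invariant of A's second loop: running max with earliest-index tie-break
theorem pv_fold_inv (string : String) :
    ∀ (rest : List (Char × Int)) (mf : Int) (c0 : Char),
      c0 ∈ string.toList → (string.toList.count c0 : Int) = mf →
      (∀ p ∈ rest, p.2 = (string.toList.count p.1 : Int) ∧ p.1 ∈ string.toList) →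
      ∃ c1, rest.foldl (pvStepA string) (mf, String.ofList [c0])
              = ((string.toList.count c1 : Int), String.ofList [c1]) ∧
        c1 ∈ c0 :: rest.map Prod.fst ∧ c1 ∈ string.toList ∧
        mf ≤ (string.toList.count c1 : Int) ∧
        (∀ p ∈ rest, p.2 ≤ (string.toList.count c1 : Int)) ∧
        ((string.toList.count c0 : Int) = (string.toList.count c1 : Int) →
          string.toList.idxOf c1 ≤ string.toList.idxOf c0) ∧
        (∀ p ∈ rest, p.2 = (string.toList.count c1 : Int) →
          string.toList.idxOf c1 ≤ string.toList.idxOf p.1) := by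
  intro rest
  induction rest with
  | nil =>
    intro mf c0 hc0 hcnt _
    refine ⟨c0, ?_, by simp, hc0, by omega, by simp, by simp, by simp⟩
    simp [List.foldl_nil, hcnt]
  | cons q rest' ih =>
    intro mf c0 hc0 hcnt hall
    obtain ⟨c, k⟩ := q
    obtain ⟨hk, hcmem⟩ := hall (c, k) (List.mem_cons_self)
    simp only at hk
    have hall' : ∀ p ∈ rest', p.2 = (string.toList.count p.1 : Int) ∧ p.1 ∈ string.toList :=
      fun p hp => hall p (List.mem_cons_of_mem _ hp)
    have hfc : PySem.Str.find string (String.ofList [c]) = (string.toList.idxOf c : Int) := by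
      simp only [PySem.Str.find_eq, String.toList_ofList]
      exact pv_find_singleton _ _ hcmem
    have hfc0 : PySem.Str.find string (String.ofList [c0]) = (string.toList.idxOf c0 : Int) := by
      simp only [PySem.Str.find_eq, String.toList_ofList]
      exact pv_find_singleton _ _ hc0
    rw [List.foldl_cons]
    by_cases h1 : k > mf
    · -- new max: state becomes (k, [c])
      have hstep : pvStepA string (mf, String.ofList [c0]) (c, k) = (k, String.ofList [c]) := by
        simp [pvStepA, h1]
      rw [hstep, hk]
      obtain ⟨c1, heq, hmem, hc1l, hle, hrest, htie, hties⟩ :=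
        ih (string.toList.count c : Int) c hcmem rfl hall'
      refine ⟨c1, heq, ?_, hc1l, by omega, ?_, ?_, ?_⟩
      · rcases List.mem_cons.mp hmem with h | h
        · exact List.mem_cons_of_mem _ (h ▸ List.mem_cons_self)
        · exact List.mem_cons_of_mem _ (List.mem_cons_of_mem _ h)
      · intro p hp
        rcases List.mem_cons.mp hp with h | h
        · simp only [h]; exact hle
        · exact hrest p h
      · intro hEq; omega
      · intro p hp hpEq
        rcases List.mem_cons.mp hp with h | h
        · simp only [h] at hpEq ⊢; exact htie hpEq
        · exact hties p h hpEq
    · by_cases h2 : k = mf ∧ PySem.Str.find string (String.ofList [c]) < PySem.Str.find string (String.ofList [c0])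
      · -- tie with earlier first occurrence: state becomes (mf, [c])
        have hstep : pvStepA string (mf, String.ofList [c0]) (c, k) = (mf, String.ofList [c]) := by
          simp only [pvStepA]
          rw [if_neg h1, if_pos h2]
        rw [hstep]
        have hkm : (string.toList.count c : Int) = mf := by rw [← hk]; exact h2.1
        have hidx : string.toList.idxOf c < string.toList.idxOf c0 := by
          have := h2.2; rw [hfc, hfc0] at this; exact_mod_cast this
        obtain ⟨c1, heq, hmem, hc1l, hle, hrest, htie, hties⟩ := ih mf c hcmem hkm hall'
        refine ⟨c1, heq, ?_, hc1l, hle, ?_, ?_, ?_⟩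
        · rcases List.mem_cons.mp hmem with h | h
          · exact List.mem_cons_of_mem _ (h ▸ List.mem_cons_self)
          · exact List.mem_cons_of_mem _ (List.mem_cons_of_mem _ h)
        · intro p hp
          rcases List.mem_cons.mp hp with h | h
          · simp only [h]; omega
          · exact hrest p h
        · intro hEq
          have : string.toList.idxOf c1 ≤ string.toList.idxOf c := by
            apply htie; omega
          omega
        · intro p hp hpEq
          rcases List.mem_cons.mp hp with h | h
          · simp only [h] at hpEq ⊢
            exact htie (by omega)
          · exact hties p h hpEq
      · -- keep the state
        have hstep : pvStepA string (mf, String.ofList [c0]) (c, k) = (mf, String.ofList [c0]) := by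
          simp only [pvStepA, if_neg (by omega : ¬ k > mf), if_neg h2]
        rw [hstep]
        obtain ⟨c1, heq, hmem, hc1l, hle, hrest, htie, hties⟩ := ih mf c0 hc0 hcnt hall'
        refine ⟨c1, heq, ?_, hc1l, hle, ?_, htie, ?_⟩
        · rcases List.mem_cons.mp hmem with h | h
          · exact h ▸ List.mem_cons_self
          · exact List.mem_cons_of_mem _ (List.mem_cons_of_mem _ h)
        · intro p hp
          rcases List.mem_cons.mp hp with h | h
          · simp only [h]; omega
          · exact hrest p h
        · intro p hp hpEq
          rcases List.mem_cons.mp hp with h | h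
          · -- (c,k) ties the final max: need idxOf c1 ≤ idxOf c
            simp only [h] at hpEq ⊢
            -- k ≤ mf; if k < mf then k < count c1, contradiction with hpEq
            have hkmf : k = mf := by
              by_contra hne
              have : k < mf := by omega
              omega
            have hidx0 : string.toList.idxOf c0 ≤ string.toList.idxOf c := by
              rcases not_and_or.mp h2 with h | h
              · exact absurd hkmf h
              · rw [hfc, hfc0] at h; omega
            have : string.toList.idxOf c1 ≤ string.toList.idxOf c0 := by
              apply htie; omega
            omega
          · exact hties p h hpEq

-- the accumulator of a fold that keeps `some` states stays `some`
theorem pv_max_foldl_some (f : Option Int → Int → Option Int)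
    (hf : ∀ m x, ∃ w, f (some m) x = some w) :
    ∀ (xs : List Int) (m : Int), ∃ v, List.foldl f (some m) xs = some v := by
  intro xs
  induction xs with
  | nil => intro m; exact ⟨m, rfl⟩
  | cons x t ih =>
    intro m
    rw [List.foldl_cons]
    obtain ⟨w, hw⟩ := hf m x
    rw [hw]
    exact ih w

-- max? over a nonempty list is some
theorem pv_max?_cons (x : Int) (xs : List Int) :
    ∃ v, PySem.List.max? (x :: xs) (id : Int → Int) = some v := by
  unfold PySem.List.max?
  rw [List.foldl_cons]
  show ∃ v, List.foldl _ (some x) xs = some v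
  refine pv_max_foldl_some _ (fun m x => ⟨if m < x then x else m, ?_⟩) xs x
  show (if id m < id x then some x else some m) = some (if m < x then x else m)
  by_cases h : m < x <;> simp [h]

-- the two ports agree on every string
theorem pv_main (string : String) :
    find_highest_frequency_character string = find_highest_frequency_character_alt string := by
  by_cases hemp : string.toList = []
  · have hs : string = "" := by
      have := congrArg String.ofList hemp
      simpa using this
    subst hs
    rfl
  · -- A's dict is Counter(string); its items are the distinct chars with their counts
    have hA : find_highest_frequency_character string
        = (((PySem.Dict.counter string.toList).items).foldl (pvStepA string) (0, "")).2 := by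
      simp only [find_highest_frequency_character]
      rw [pv_foldA_eq_counter, PySem.Dict.foldl_insert_getD_add_one_eq_counter]
    have hitems : (PySem.Dict.counter string.toList).items
        = (PySem.Set.ofList string.toList).map
            (fun k => (k, (string.toList.count k : Int))) :=
      PySem.Dict.items_counter string.toList
    -- the distinct-char list is nonempty
    obtain ⟨c, t, hl⟩ := List.exists_cons_of_ne_nil hemp
    have hcS : c ∈ PySem.Set.ofList string.toList :=
      (PySem.Set.mem_ofList _ _).mpr (by rw [hl]; exact List.mem_cons_self)
    have hSne : PySem.Set.ofList string.toList ≠ [] := by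
      intro h; rw [h] at hcS; exact (List.not_mem_nil) hcS
    obtain ⟨s0, S', hS⟩ := List.exists_cons_of_ne_nil hSne
    have hs0l : s0 ∈ string.toList :=
      (PySem.Set.mem_ofList _ _).mp (by rw [hS]; exact List.mem_cons_self)
    have hS'l : ∀ x ∈ S', x ∈ string.toList := by
      intro x hx
      exact (PySem.Set.mem_ofList _ _).mp (by rw [hS]; exact List.mem_cons_of_mem _ hx)
    have hpos : (0 : Int) < (string.toList.count s0 : Int) := by
      exact_mod_cast List.count_pos_iff.mpr hs0l
    -- run A's loop: first item raises the max from 0, then the invariant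
    have hall : ∀ p ∈ S'.map (fun k => (k, (string.toList.count k : Int))),
        p.2 = (string.toList.count p.1 : Int) ∧ p.1 ∈ string.toList := by
      intro p hp
      obtain ⟨k, hk, rfl⟩ := List.mem_map.mp hp
      exact ⟨rfl, hS'l k hk⟩
    obtain ⟨c1, heq, hmem, hc1l, hle, hrest, htie, hties⟩ :=
      pv_fold_inv string (S'.map (fun k => (k, (string.toList.count k : Int))))
        (string.toList.count s0 : Int) s0 hs0l rfl hall
    have hstep0 : pvStepA string (0, "") (s0, (string.toList.count s0 : Int))
        = ((string.toList.count s0 : Int), String.ofList [s0]) := by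
      simp only [pvStepA]
      rw [if_pos hpos]
    have hAval : find_highest_frequency_character string = String.ofList [c1] := by
      rw [hA, hitems, hS, List.map_cons, List.foldl_cons, hstep0, heq]
    -- keys of the processed items are exactly the distinct chars
    have hkeys : (S'.map (fun k => (k, (string.toList.count k : Int)))).map Prod.fst = S' := by
      have hcomp : (Prod.fst ∘ fun k : Char => (k, (string.toList.count k : Int))) = id := rfl
      rw [List.map_map, hcomp, List.map_id]
    have hc1S : c1 ∈ PySem.Set.ofList string.toList := by
      rw [hS]; rw [hkeys] at hmem; exact hmem
    -- c1 has the maximal count, with the least first-occurrence index among ties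
    have hmax_all : ∀ x ∈ PySem.Set.ofList string.toList,
        (string.toList.count x : Int) ≤ (string.toList.count c1 : Int) := by
      intro x hx
      rw [hS] at hx
      rcases List.mem_cons.mp hx with h | h
      · subst h; exact hle
      · exact hrest (x, (string.toList.count x : Int)) (List.mem_map.mpr ⟨x, h, rfl⟩)
    have hmin_all : ∀ x ∈ string.toList,
        (string.toList.count x : Int) = (string.toList.count c1 : Int) →
        string.toList.idxOf c1 ≤ string.toList.idxOf x := by
      intro x hx hcx
      have hxS : x ∈ PySem.Set.ofList string.toList := (PySem.Set.mem_ofList _ _).mpr hx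
      rw [hS] at hxS
      rcases List.mem_cons.mp hxS with h | h
      · subst h; exact htie hcx
      · exact hties (x, (string.toList.count x : Int)) (List.mem_map.mpr ⟨x, h, rfl⟩) hcx
    -- B's side
    have hne : ¬ string.isEmpty = true := by
      intro h
      rw [String.isEmpty_iff] at h
      subst h
      exact hemp rfl
    have hvals : (PySem.Dict.counter string.toList).values
        = (string.toList.count s0 : Int)
            :: S'.map (fun k => (string.toList.count k : Int)) := by
      show (PySem.Dict.counter string.toList).items.map (fun p => p.2) = _
      rw [hitems, hS]
      simp
    obtain ⟨v, hv⟩ := pv_max?_cons (string.toList.count s0 : Int)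
      (S'.map (fun k => (string.toList.count k : Int)))
    have hvmax : ∀ y ∈ (PySem.Dict.counter string.toList).values, y ≤ v := by
      intro y hy
      rw [hvals] at hy
      exact PySem.List.max?_isMax hv y hy
    have hvmem : v ∈ (PySem.Dict.counter string.toList).values := by
      rw [hvals]; exact PySem.List.max?_mem hv
    have hveq : v = (string.toList.count c1 : Int) := by
      have le1 : v ≤ (string.toList.count c1 : Int) := by
        rw [hvals] at hvmem
        rcases List.mem_cons.mp hvmem with h | h
        · subst h
          exact hmax_all s0 ((PySem.Set.mem_ofList _ _).mpr hs0l)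
        · obtain ⟨x, hx, rfl⟩ := List.mem_map.mp h
          exact hmax_all x ((PySem.Set.mem_ofList _ _).mpr (hS'l x hx))
      have le2 : (string.toList.count c1 : Int) ≤ v := by
        apply hvmax
        show _ ∈ (PySem.Dict.counter string.toList).items.map (fun p => p.2)
        rw [hitems, List.map_map]
        exact List.mem_map.mpr ⟨c1, hc1S, rfl⟩
      omega
    have hvfold : PySem.List.max? (PySem.Dict.counter string.toList).values (id : Int → Int)
        = some v := by rw [hvals]; exact hv
    -- the scan of the original string finds exactly c1
    have hpred : (fun ch => (PySem.Dict.counter string.toList).getD ch 0 == v)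
        = (fun ch => ((string.toList.count ch : Int)) == (string.toList.count c1 : Int)) := by
      funext ch
      rw [PySem.Dict.getD_counter, hveq]
    have hfsome : (string.toList.find? (fun ch =>
        ((string.toList.count ch : Int)) == (string.toList.count c1 : Int))).isSome := by
      rw [List.find?_isSome]
      exact ⟨c1, hc1l, by simp⟩
    obtain ⟨cB, hcB⟩ := Option.isSome_iff_exists.mp hfsome
    have hcBl : cB ∈ string.toList := List.mem_of_find?_eq_some hcB
    have hcBcnt : (string.toList.count cB : Int) = (string.toList.count c1 : Int) := by
      have := List.find?_some hcB
      exact beq_iff_eq.mp this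
    have hidx1 : string.toList.idxOf cB ≤ string.toList.idxOf c1 :=
      pv_find?_first string.toList _ cB hcB c1 hc1l (by simp)
    have hidx2 : string.toList.idxOf c1 ≤ string.toList.idxOf cB :=
      hmin_all cB hcBl hcBcnt
    have hcBc1 : cB = c1 :=
      pv_idxOf_inj string.toList cB c1 hcBl hc1l (Nat.le_antisymm hidx1 hidx2)
    have hBval : find_highest_frequency_character_alt string = String.ofList [cB] := by
      simp only [find_highest_frequency_character_alt, if_neg hne]
      rw [PySem.Dict.foldl_insert_getD_add_one_eq_counter, hvfold]
      show (match string.toList.find? (fun ch =>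
          (PySem.Dict.counter string.toList).getD ch 0 == (some v).getD 0) with
        | some c => String.ofList [c]
        | none => "") = _
      have : (fun ch => (PySem.Dict.counter string.toList).getD ch 0 == (some v).getD 0)
          = (fun ch => ((string.toList.count ch : Int)) == (string.toList.count c1 : Int)) := by
        rw [show (some v).getD 0 = v from rfl]
        exact hpred
      rw [this, hcB]
    rw [hAval, hBval, hcBc1]

-- ===== VERDICT (by name: the statement is the Claim_ definition above) =====
theorem find_highest_frequency_character_spec : Claim_equal_find_highest_frequency_character := by
  intro string _
  unfold Spec_find_highest_frequency_character
  exact pv_main string
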